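-- pv_equiv track=rewrite | github.com/mohammadshivaii/tamrin2 | Untitled-2.py | sum_prime_factors
-- ===== SOURCE A (Python) =====
-- def sum_prime_factors(x):
--     total, factor = 0, 2
--     while x > 1:
--         while x % factor == 0:
--             total += factor
--             x //= factor
--         factor += 1
--     return total
-- ===== SOURCE B (Python) =====
-- def sum_prime_factors(x):
--     def strip(n, f):
--         s = 0
--         while n % f == 0:
--             n //= f
--             s += f
--         return n, s
--     if x < 2:
--         return 0
--     x, total = strip(x, 2)
--     f = 3
--     while f * f <= x:
--         x, s = strip(x, f)
--         total += s
--         f += 2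
--     return total + x if x > 1 else total
-- ===== Notes on version B (the rewrite author's own statement) =====
-- stated objective: faster
-- what changed: B trial-divides only up to sqrt(x) (factor 2 first, then odd candidates only, via a strip helper) and adds the remaining cofactor, necessarily prime, once at the end, instead of A's scan of every candidate factor up to x.
import Mathlib
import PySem

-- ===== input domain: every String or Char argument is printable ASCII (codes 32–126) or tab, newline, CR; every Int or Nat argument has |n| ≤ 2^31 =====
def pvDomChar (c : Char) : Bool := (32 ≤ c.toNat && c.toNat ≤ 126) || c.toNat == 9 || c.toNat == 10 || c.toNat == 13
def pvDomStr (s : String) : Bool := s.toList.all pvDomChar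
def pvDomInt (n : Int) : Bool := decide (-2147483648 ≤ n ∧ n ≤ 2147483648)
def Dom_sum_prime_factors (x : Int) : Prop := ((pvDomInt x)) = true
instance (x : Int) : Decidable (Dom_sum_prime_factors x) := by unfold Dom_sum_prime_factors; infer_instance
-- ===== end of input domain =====

-- B re-implements the sum of prime factors by trial division only up to √x (factor 2 first, then
-- odd candidates), adding the leftover prime cofactor at the end; A scans every candidate up to x.
-- Equal return value proved for every Int input; neither program mutates anything.

-- `Inv_spf x f` says no candidate in [2, f) divides x: true at every state A's loop reaches, used
-- only to justify termination of the Lean recursions (erased at run time) and by the proofs below.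
def Inv_spf (x f : Int) : Prop := ∀ d : Int, 2 ≤ d → d < f → ¬ d ∣ x

-- small arithmetic facts the definitions cite by name (kept out of the bodies)
theorem spf_fd_lt {x f : Int} (hx : 0 < x) (hf : 2 ≤ f) : PySem.Int.floordiv x f < x := by
  rw [PySem.Int.floordiv_eq_ediv_of_pos (by omega)]
  exact Int.ediv_lt_of_lt_mul (by omega) (by nlinarith)

theorem spf_fd_pos {x f : Int} (hx : 0 < x) (hf : 2 ≤ f) (hd : f ∣ x) :
    0 < PySem.Int.floordiv x f := by
  rw [PySem.Int.floordiv_eq_ediv_of_pos (by omega)]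
  rcases hd with ⟨c, hc⟩
  have hc0 : 0 < c := by nlinarith
  rw [hc, Int.mul_ediv_cancel_left _ (by omega)]
  exact hc0

theorem spf_fd_dvd {x f : Int} (hf : 2 ≤ f) (hd : f ∣ x) : PySem.Int.floordiv x f ∣ x := by
  rw [PySem.Int.floordiv_eq_ediv_of_pos (by omega)]
  exact Int.ediv_dvd_of_dvd hd

theorem spf_inv_div {x f g : Int} (h : Inv_spf x g) (hf : 2 ≤ f) (hd : f ∣ x) :
    Inv_spf (PySem.Int.floordiv x f) g :=
  fun d h2 hlt hdvd => h d h2 hlt (hdvd.trans (spf_fd_dvd hf hd))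

theorem spf_inv_succ {x f : Int} (h : Inv_spf x f) (hd : ¬ f ∣ x) : Inv_spf x (f + 1) := by
  intro d h2 hlt hdvd
  rcases lt_or_eq_of_le (by omega : d ≤ f) with h' | h'
  · exact h d h2 h' hdvd
  · exact hd (h' ▸ hdvd)

theorem spf_factor_lt {x f : Int} (h : Inv_spf x f) (hx : 1 < x) (hd : ¬ f ∣ x) : f < x := by
  rcases lt_trichotomy f x with h' | h' | h'
  · exact h'
  · exact absurd (h' ▸ dvd_refl x) hd
  · exact absurd (h x (by omega) h' (dvd_refl x)) (by simp)

theorem spf_measA_div {x f c : Int} (hx : 0 < x) (hf : 2 ≤ f) :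
    (PySem.Int.floordiv x f).toNat + (PySem.Int.floordiv x f - c).toNat < x.toNat + (x - c).toNat := by
  have h1 := spf_fd_lt hx hf
  have h2 : 0 ≤ PySem.Int.floordiv x f := by
    rw [PySem.Int.floordiv_eq_ediv_of_pos (by omega)]
    exact Int.ediv_nonneg (by omega) (by omega)
  omega

theorem spf_measA_inc {x : Int} (k : Nat) (h : (k : Int) + 2 < x) :
    x.toNat + (x - ((k + 1 : Nat) : Int)).toNat < x.toNat + (x - (k : Int)).toNat := by
  push_cast; omega

theorem spf_measS {x f : Int} (hx : 0 < x) (hf : 2 ≤ f) :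
    (PySem.Int.floordiv x f).toNat < x.toNat := by
  have h1 := spf_fd_lt hx hf
  have h2 : 0 ≤ PySem.Int.floordiv x f := by
    rw [PySem.Int.floordiv_eq_ediv_of_pos (by omega)]
    exact Int.ediv_nonneg (by omega) (by omega)
  omega

theorem spf_k_lt {x : Int} (k : Nat) (h : (2 * (k : Int) + 3) * (2 * (k : Int) + 3) ≤ x) :
    (k : Int) < x := by
  have : (0 : Int) ≤ (k : Int) := Int.natCast_nonneg k
  nlinarith

theorem spf_measB {x y : Int} (k : Nat) (h1 : y ≤ x) (h2 : (k : Int) < x) :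
    (y - ((k + 1 : Nat) : Int)).toNat < (x - (k : Int)).toNat := by
  push_cast; omega

-- ===== PORT A =====
-- A's outer/inner while pair, flattened to one recursion over the same state (x, factor, total);
-- the factor is carried as k with factor = k + 2, and the Prop argument is the loop invariant
-- (needed for termination of the recursion only).
def pvLoopA (x : Int) (k : Nat) (t : Int) (h : Inv_spf x ((k : Int) + 2)) : Int :=
  if hx : 1 < x then
    if hd : PySem.Int.mod x ((k : Int) + 2) = 0 then
      -- total += factor; x //= factor
      pvLoopA (PySem.Int.floordiv x ((k : Int) + 2)) k (t + ((k : Int) + 2))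
        (spf_inv_div h (by omega) ((PySem.Int.mod_eq_zero_iff_dvd x _).mp hd))
    else
      -- factor += 1
      pvLoopA x (k + 1) t
        (fun d h2 hlt =>
          spf_inv_succ h (fun hdvd => hd ((PySem.Int.mod_eq_zero_iff_dvd x _).mpr hdvd))
            d h2 (by push_cast at hlt ⊢; omega))
  else t
termination_by x.toNat + (x - (k : Int)).toNat
decreasing_by
  · exact spf_measA_div (by omega) (by omega)
  · exact spf_measA_inc k
      (spf_factor_lt h hx (fun hdvd => hd ((PySem.Int.mod_eq_zero_iff_dvd x _).mpr hdvd)))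

def sum_prime_factors (x : Int) : Int :=
  pvLoopA x 0 0 (fun d h2 hlt _ => by omega)

-- ===== PORT B =====
-- B's `strip` helper: divide the factor f out of n completely, accumulating s += f per division.
def pvStrip (n f s : Int) (hn : 0 < n) (hf : 2 ≤ f) : Int × Int :=
  if hd : PySem.Int.mod n f = 0 then
    pvStrip (PySem.Int.floordiv n f) f (s + f)
      (spf_fd_pos hn hf ((PySem.Int.mod_eq_zero_iff_dvd n _).mp hd)) hf
  else (n, s)
termination_by n.toNat
decreasing_by exact spf_measS hn hf

theorem pvStrip_pos (n f s : Int) (hn : 0 < n) (hf : 2 ≤ f) : 0 < (pvStrip n f s hn hf).1 := by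
  fun_induction pvStrip n f s hn hf with
  | case1 n s hn hd ih => exact ih
  | case2 n s hn hd => simpa using hn

theorem pvStrip_le (n f s : Int) (hn : 0 < n) (hf : 2 ≤ f) : (pvStrip n f s hn hf).1 ≤ n := by
  fun_induction pvStrip n f s hn hf with
  | case1 n s hn hd ih => exact le_trans ih (le_of_lt (spf_fd_lt hn hf))
  | case2 n s hn hd => simp

-- B's outer while over the odd candidates f = 2k + 3 while f² ≤ x, then `total + x if x > 1`.
def pvLoopB (x : Int) (k : Nat) (t : Int) (hx : 0 < x) : Int :=
  if hf2 : (2 * (k : Int) + 3) * (2 * (k : Int) + 3) ≤ x then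
    let p := pvStrip x (2 * (k : Int) + 3) 0 hx (by omega)
    pvLoopB p.1 (k + 1) (t + p.2) (pvStrip_pos x _ 0 hx (by omega))
  else if 1 < x then t + x else t
termination_by (x - (k : Int)).toNat
decreasing_by
  exact spf_measB k (pvStrip_le x _ 0 hx (by omega)) (spf_k_lt k hf2)

def sum_prime_factors_alt (x : Int) : Int :=
  if hx2 : x < 2 then 0
  else
    let p := pvStrip x 2 0 (by omega) (by omega)
    pvLoopB p.1 0 p.2 (pvStrip_pos x 2 0 (by omega) (by omega))

-- ===== PRECONDITION & SPEC =====
def Spec_sum_prime_factors (x : Int) (out : Int) : Prop := out = sum_prime_factors_alt x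
instance (x : Int) (out : Int) : Decidable (Spec_sum_prime_factors x out) := by unfold Spec_sum_prime_factors; infer_instance

-- ===== CLAIM (what is proved, stated in full; the proofs are below) =====
def Claim_equal_sum_prime_factors : Prop := ∀ (x : Int), Dom_sum_prime_factors x → Spec_sum_prime_factors x (sum_prime_factors x)

-- ===== LEMMAS AND PROOFS =====

theorem pvStrip_dvd (n f s : Int) (hn : 0 < n) (hf : 2 ≤ f) : (pvStrip n f s hn hf).1 ∣ n := by
  fun_induction pvStrip n f s hn hf with
  | case1 n s hn hd ih =>
    exact ih.trans (spf_fd_dvd hf ((PySem.Int.mod_eq_zero_iff_dvd n _).mp hd))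
  | case2 n s hn hd => simp

theorem pvStrip_not_dvd (n f s : Int) (hn : 0 < n) (hf : 2 ≤ f) :
    ¬ f ∣ (pvStrip n f s hn hf).1 := by
  fun_induction pvStrip n f s hn hf with
  | case1 n s hn hd ih => exact ih
  | case2 n s hn hd =>
    simpa using fun hdvd => hd ((PySem.Int.mod_eq_zero_iff_dvd n _).mpr hdvd)

-- x has no nontrivial divisor at all once nothing below f divides it and f² > x
theorem spf_no_div {x f : Int} (hf : 2 ≤ f) (h : Inv_spf x f) (hff : x < f * f) :
    ∀ d : Int, 2 ≤ d → d < x → ¬ d ∣ x := by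
  intro d hd2 hdx hdvd
  have hdf : f ≤ d := by
    by_contra hc
    exact h d hd2 (by omega) hdvd
  rcases hdvd with ⟨c, hc⟩
  have hc2 : 2 ≤ c := by nlinarith
  have hcf : f ≤ c := by
    by_contra hcc
    exact h c hc2 (by omega) ⟨d, by rw [hc, mul_comm]⟩
  have h5 : f * f ≤ d * c := mul_le_mul hdf hcf (by omega) (by omega)
  rw [hc] at hdx hff
  linarith

theorem spf_self_le {x f : Int} (h : Inv_spf x f) (hx : 1 < x) : f ≤ x := by
  by_contra hc
  exact absurd (h x (by omega) (by omega) (dvd_refl x)) (by simp)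

-- rewriting the total argument of pvLoopA
theorem pvLoopA_targ (n : Int) (k : Nat) {t1 t2 : Int} (h : Inv_spf n ((k : Int) + 2))
    (e : t1 = t2) : pvLoopA n k t1 h = pvLoopA n k t2 h := by rw [e]

-- pvStrip performs exactly the divide steps of pvLoopA (A's inner while)
theorem pvLoopA_strip (n f : Int) (k : Nat) (s : Int) (hn : 0 < n) (hf : 2 ≤ f)
    (hkf : f = (k : Int) + 2) :
    ∀ (t : Int) (h : Inv_spf n ((k : Int) + 2))
      (h' : Inv_spf (pvStrip n f s hn hf).1 ((k : Int) + 2)),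
      pvLoopA n k t h =
        pvLoopA (pvStrip n f s hn hf).1 k (t + ((pvStrip n f s hn hf).2 - s)) h' := by
  subst hkf
  fun_induction pvStrip n ((k : Int) + 2) s hn hf with
  | case1 n s hn hd ih =>
    intro t h h'
    have hdvd : ((k : Int) + 2) ∣ n := (PySem.Int.mod_eq_zero_iff_dvd n _).mp hd
    have h1 : 1 < n := by
      have := Int.le_of_dvd hn hdvd
      omega
    have h2 : Inv_spf (PySem.Int.floordiv n ((k : Int) + 2)) ((k : Int) + 2) :=
      spf_inv_div h (by omega) hdvd
    have step1 : pvLoopA n k t h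
        = pvLoopA (PySem.Int.floordiv n ((k : Int) + 2)) k (t + ((k : Int) + 2)) h2 := by
      rw [pvLoopA, dif_pos h1, dif_pos hd]
    exact step1.trans ((ih (t + ((k : Int) + 2)) h2 h').trans (pvLoopA_targ _ _ h' (by ring)))
  | case2 n s hn hd =>
    intro t h h'
    exact pvLoopA_targ n k h' (by ring)

-- one `factor += 1` step of A
theorem pvLoopA_inc (n : Int) (k : Nat) (t : Int) (h : Inv_spf n ((k : Int) + 2))
    (hnd : ¬ ((k : Int) + 2) ∣ n) (h' : Inv_spf n (((k + 1 : Nat) : Int) + 2)) :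
    pvLoopA n k t h = pvLoopA n (k + 1) t h' := by
  by_cases h1 : 1 < n
  · rw [pvLoopA, dif_pos h1,
      dif_neg (fun hd => hnd ((PySem.Int.mod_eq_zero_iff_dvd n _).mp hd))]
  · rw [pvLoopA, dif_neg h1, pvLoopA, dif_neg h1]

-- tail of A once x has no nontrivial divisors: the factor climbs to x, divides once, stops
theorem pvLoopA_prime (x : Int) (j : Nat) (t : Int) (h : Inv_spf x ((j : Int) + 2)) (hx : 1 < x)
    (hp : ∀ d : Int, 2 ≤ d → d < x → ¬ d ∣ x) (hfx : (j : Int) + 2 ≤ x) :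
    pvLoopA x j t h = t + x := by
  rcases eq_or_lt_of_le hfx with heq | hlt
  · have hd : PySem.Int.mod x ((j : Int) + 2) = 0 :=
      (PySem.Int.mod_eq_zero_iff_dvd x _).mpr (heq ▸ dvd_refl x)
    rw [pvLoopA, dif_pos hx, dif_pos hd]
    have hq : PySem.Int.floordiv x ((j : Int) + 2) = 1 := by
      rw [heq, PySem.Int.floordiv_eq_ediv_of_pos (by omega)]
      exact Int.ediv_self (by omega)
    rw [pvLoopA]
    simp only [hq]
    rw [dif_neg (by omega)]
    omega
  · have hd : ¬ PySem.Int.mod x ((j : Int) + 2) = 0 := fun hd =>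
      hp _ (by omega) hlt ((PySem.Int.mod_eq_zero_iff_dvd x _).mp hd)
    rw [pvLoopA, dif_pos hx, dif_neg hd]
    exact pvLoopA_prime x (j + 1) t _ hx hp (by push_cast; omega)
termination_by (x - (j : Int)).toNat
decreasing_by omega

-- main equivalence, by the structure of B's outer loop; j is A's factor index, f_A = j+2 = 2k+3
theorem pvLoopB_eq (x : Int) (k : Nat) (t : Int) (hx : 0 < x) (j : Nat)
    (hj : (j : Int) = 2 * (k : Int) + 1) :
    ∀ (hA : Inv_spf x ((j : Int) + 2)), pvLoopB x k t hx = pvLoopA x j t hA := by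
  intro hA
  rw [pvLoopB]
  by_cases hf2 : (2 * (k : Int) + 3) * (2 * (k : Int) + 3) ≤ x
  · rw [dif_pos hf2]
    have hf : (2:Int) ≤ 2 * (k : Int) + 3 := by omega
    have hkf : 2 * (k : Int) + 3 = (j : Int) + 2 := by omega
    -- p = strip x (2k+3) 0
    have hP1 := pvStrip_pos x (2 * (k : Int) + 3) 0 hx (by omega)
    have hPd := pvStrip_dvd x (2 * (k : Int) + 3) 0 hx (by omega)
    have hPn := pvStrip_not_dvd x (2 * (k : Int) + 3) 0 hx (by omega)
    have hA1 : Inv_spf (pvStrip x (2 * (k : Int) + 3) 0 hx (by omega)).1 ((j : Int) + 2) :=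
      fun d h2 hlt hdvd => hA d h2 hlt (hdvd.trans hPd)
    have hnd1 : ¬ ((j : Int) + 2) ∣ (pvStrip x (2 * (k : Int) + 3) 0 hx (by omega)).1 := by
      rw [← hkf]; exact hPn
    have hA2 : Inv_spf (pvStrip x (2 * (k : Int) + 3) 0 hx (by omega)).1 (((j + 1 : Nat) : Int) + 2) := by
      intro d h2 hlt hdvd
      exact spf_inv_succ hA1 hnd1 d h2 (by push_cast at hlt ⊢; omega) hdvd
    have hnd2 : ¬ (((j + 1 : Nat) : Int) + 2) ∣ (pvStrip x (2 * (k : Int) + 3) 0 hx (by omega)).1 := by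
      intro hdvd
      have h2d : (2:Int) ∣ (((j + 1 : Nat) : Int) + 2) := by push_cast; omega
      exact hA1 2 (by omega) (by omega) (h2d.trans hdvd)
    have hA3 : Inv_spf (pvStrip x (2 * (k : Int) + 3) 0 hx (by omega)).1 (((j + 1 + 1 : Nat) : Int) + 2) := by
      intro d h2 hlt hdvd
      exact spf_inv_succ hA2 hnd2 d h2 (by push_cast at hlt ⊢; omega) hdvd
    calc (let p := pvStrip x (2 * (k : Int) + 3) 0 hx (by omega)
          pvLoopB p.1 (k + 1) (t + p.2) (pvStrip_pos x _ 0 hx (by omega)))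
        = pvLoopA (pvStrip x (2 * (k : Int) + 3) 0 hx (by omega)).1 (j + 1 + 1)
            (t + (pvStrip x (2 * (k : Int) + 3) 0 hx (by omega)).2) hA3 := by
          exact pvLoopB_eq (pvStrip x (2 * (k : Int) + 3) 0 hx (by omega)).1 (k + 1)
            (t + (pvStrip x (2 * (k : Int) + 3) 0 hx (by omega)).2) (pvStrip_pos x _ 0 hx (by omega))
            (j + 1 + 1) (by push_cast; omega) hA3
      _ = pvLoopA (pvStrip x (2 * (k : Int) + 3) 0 hx (by omega)).1 (j + 1)
            (t + (pvStrip x (2 * (k : Int) + 3) 0 hx (by omega)).2) hA2 :=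
          (pvLoopA_inc _ (j + 1) _ hA2 hnd2 hA3).symm
      _ = pvLoopA (pvStrip x (2 * (k : Int) + 3) 0 hx (by omega)).1 j
            (t + (pvStrip x (2 * (k : Int) + 3) 0 hx (by omega)).2) hA1 :=
          (pvLoopA_inc _ j _ hA1 hnd1 hA2).symm
      _ = pvLoopA x j t hA :=
          ((pvLoopA_strip x (2 * (k : Int) + 3) j 0 hx (by omega) hkf t hA hA1).trans
            (pvLoopA_targ _ _ hA1 (by ring))).symm
  · rw [dif_neg hf2]
    by_cases h1 : 1 < x
    · rw [if_pos h1]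
      have hInv : Inv_spf x (2 * (k : Int) + 3) := by
        intro d h2 hlt hdvd
        exact hA d h2 (by omega) hdvd
      exact (pvLoopA_prime x j t hA h1
        (spf_no_div (by omega) hInv (by omega))
        (by rw [show (j : Int) + 2 = 2 * (k : Int) + 3 from by omega]
            exact spf_self_le hInv h1)).symm
    · rw [if_neg h1, pvLoopA, dif_neg h1]
termination_by (x - (k : Int)).toNat
decreasing_by
  exact spf_measB k (pvStrip_le x _ 0 hx (by omega)) (spf_k_lt k hf2)


-- A with factor 2 stripped and one `factor += 1` step equals B's top level
theorem spf_main (x : Int) (hA : Inv_spf x (((0 : Nat) : Int) + 2)) :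
    pvLoopA x 0 0 hA = sum_prime_factors_alt x := by
  unfold sum_prime_factors_alt
  by_cases hx2 : x < 2
  · rw [dif_pos hx2, pvLoopA, dif_neg (by omega)]
  · rw [dif_neg hx2]
    have hx : (0 : Int) < x := by omega
    have hkf : (2 : Int) = ((0 : Nat) : Int) + 2 := by norm_num
    have hPd := pvStrip_dvd x 2 0 hx (by omega)
    have hPn := pvStrip_not_dvd x 2 0 hx (by omega)
    have hP1 := pvStrip_pos x 2 0 hx (by omega)
    have hA1 : Inv_spf (pvStrip x 2 0 hx (by omega)).1 (((0 : Nat) : Int) + 2) :=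
      fun d h2 hlt hdvd => hA d h2 hlt (hdvd.trans hPd)
    have hnd : ¬ (((0 : Nat) : Int) + 2) ∣ (pvStrip x 2 0 hx (by omega)).1 := by
      rw [← hkf]; exact hPn
    have hA2 : Inv_spf (pvStrip x 2 0 hx (by omega)).1 (((0 + 1 : Nat) : Int) + 2) := by
      intro d h2 hlt hdvd
      exact spf_inv_succ hA1 hnd d h2 (by push_cast at hlt ⊢; omega) hdvd
    have harg : (0 : Int) + ((pvStrip x 2 0 hx (by omega)).2 - 0)
        = (pvStrip x 2 0 hx (by omega)).2 := by ring
    calc pvLoopA x 0 0 hA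
        = pvLoopA (pvStrip x 2 0 hx (by omega)).1 0
            (0 + ((pvStrip x 2 0 hx (by omega)).2 - 0)) hA1 :=
          pvLoopA_strip x 2 0 0 hx (by omega) hkf 0 hA hA1
      _ = pvLoopA (pvStrip x 2 0 hx (by omega)).1 (0 + 1)
            (0 + ((pvStrip x 2 0 hx (by omega)).2 - 0)) hA2 :=
          pvLoopA_inc _ 0 _ hA1 hnd hA2
      _ = pvLoopB (pvStrip x 2 0 hx (by omega)).1 0
            (0 + ((pvStrip x 2 0 hx (by omega)).2 - 0)) hP1 :=
          (pvLoopB_eq _ 0 _ hP1 (0 + 1) (by norm_num) hA2).symm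
      _ = pvLoopB (pvStrip x 2 0 hx (by omega)).1 0 (pvStrip x 2 0 hx (by omega)).2 hP1 := by
          rw [harg]

-- ===== VERDICT (by name: the statement is the Claim_ definition above) =====
theorem sum_prime_factors_spec : Claim_equal_sum_prime_factors := by
  intro x _
  unfold Spec_sum_prime_factors sum_prime_factors
  exact spf_main x _
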